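-- pv_equiv track=rewrite | github.com/bcschwimm/adventofcode2020 | day6/ans.py | yesIntersect
-- ===== SOURCE A (Python) =====
-- def yesIntersect(data):
--     """
--     creates a list of sets and adds
--     only intersecting elements to the total
--     """
--     new = []
--     common = 0
--     for group in data:
--         new.append(set(group))
--
--     for row in new:
--         inter = []
--         for elm in row:
--             inter.append(set(elm))
--
--         common += len(set.intersection(*inter)) # * for unpacking x amount of elements to pass to intersection
--
--     return common
-- ===== SOURCE B (Python) =====
-- def yesIntersect(data):
--     """
--     per group: tally, over the distinct persons, how many contain each
--     character; characters whose tally equals the number of distinct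
--     persons were answered by everyone
--     """
--     total = 0
--     for group in data:
--         persons = set(group)
--         n = len(persons)
--         counts = {}
--         for p in persons:
--             for c in set(p):
--                 counts[c] = counts.get(c, 0) + 1
--         total += sum(1 for v in counts.values() if v == n)
--     return total
-- ===== Notes on version B (the rewrite author's own statement) =====
-- stated objective: simpler
-- what changed: Replaces building per-person character sets and folding a multi-set intersection per group with a single tally pass: count for each character how many distinct persons contain it and keep characters whose count equals the number of distinct persons.
import Mathlib
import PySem

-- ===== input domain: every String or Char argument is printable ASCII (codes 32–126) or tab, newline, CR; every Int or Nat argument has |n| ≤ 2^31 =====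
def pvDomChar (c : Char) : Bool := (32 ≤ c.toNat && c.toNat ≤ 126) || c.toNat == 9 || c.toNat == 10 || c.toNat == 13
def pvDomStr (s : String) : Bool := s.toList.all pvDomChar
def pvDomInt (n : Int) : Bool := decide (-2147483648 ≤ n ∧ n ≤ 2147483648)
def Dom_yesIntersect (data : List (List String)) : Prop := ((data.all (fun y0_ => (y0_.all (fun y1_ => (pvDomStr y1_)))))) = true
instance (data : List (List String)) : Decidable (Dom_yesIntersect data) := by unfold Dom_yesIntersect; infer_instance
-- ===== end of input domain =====

-- B replaces per-person set intersection by one tally pass (count, per group, how many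
-- distinct persons contain each character and keep those hitting everyone): simpler, one idea.


-- ===== PORT A =====
-- set.intersection(*inter): fold of pairwise intersection over the list; Python raises
-- TypeError when the list is empty, which Pre_yesIntersect excludes.
def pvInterAll (xs : List (PySem.Set Char)) : PySem.Set Char :=
  match xs with
  | [] => []          -- Python: TypeError here; outside Pre_yesIntersect
  | h :: t => t.foldl PySem.Set.inter h

def yesIntersect (data : List (List String)) : Int :=
  let new := data.foldl (fun acc group => acc ++ [PySem.Set.ofList group]) []
  new.foldl (fun common row =>
    let inter := row.foldl (fun acc elm => acc ++ [PySem.Set.ofList elm.toList]) []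
    common + ((pvInterAll inter).length : Int)) 0

-- ===== PORT B =====
def yesIntersect_alt (data : List (List String)) : Int :=
  data.foldl (fun total group =>
    let persons : PySem.Set String := PySem.Set.ofList group
    let n : Int := (persons.length : Int)
    let counts : PySem.Dict Char Int :=
      persons.foldl (fun d p =>
        (PySem.Set.ofList p.toList).foldl (fun d c => d.insert c (d.getD c 0 + 1)) d)
        PySem.Dict.empty
    total + ((counts.values.countP (fun v => v == n) : Nat) : Int)) 0

-- ===== PRECONDITION & SPEC =====
-- Pre_ excludes inputs where some group contains no person strings at all: there A's
-- set.intersection, called with zero argument sets, raises TypeError (A returns nothing).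
def Pre_yesIntersect (data : List (List String)) : Prop := ∀ g ∈ data, g ≠ []
instance (data : List (List String)) : Decidable (Pre_yesIntersect data) := by unfold Pre_yesIntersect; infer_instance
def pvWitness_yesIntersect : List (List String) := [["ab", "bc"], ["x"]]

def Spec_yesIntersect (data : List (List String)) (out : Int) : Prop := out = yesIntersect_alt data
instance (data : List (List String)) (out : Int) : Decidable (Spec_yesIntersect data out) := by unfold Spec_yesIntersect; infer_instance

-- ===== CLAIM (what is proved, stated in full; the proofs are below) =====
def Claim_equal_yesIntersect : Prop := ∀ (data : List (List String)), Dom_yesIntersect data → Pre_yesIntersect data → Spec_yesIntersect data (yesIntersect data)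

-- ===== LEMMAS AND PROOFS =====

-- membership in the fold of pairwise intersections
lemma mem_foldl_inter (ts : List (PySem.Set Char)) (s : PySem.Set Char) (c : Char) :
    c ∈ ts.foldl PySem.Set.inter s ↔ c ∈ s ∧ ∀ t ∈ ts, c ∈ t := by
  induction ts generalizing s with
  | nil => simp
  | cons t ts ih =>
      simp [List.foldl_cons, ih, PySem.Set.mem_inter]
      tauto

lemma nodup_foldl_inter (ts : List (PySem.Set Char)) (s : PySem.Set Char) (hs : s.Nodup) :
    (ts.foldl PySem.Set.inter s).Nodup := by
  induction ts generalizing s with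
  | nil => exact hs
  | cons t ts ih => exact ih _ (List.Nodup.filter _ hs)

-- the tally dict: its lookup counts how many persons of ps contain c
lemma counts_getD (ps : List String) (d : PySem.Dict Char Int) (c : Char) :
    ((ps.foldl (fun d p =>
        (PySem.Set.ofList p.toList).foldl (fun d c => d.insert c (d.getD c 0 + 1)) d) d)).getD c 0
      = d.getD c 0 + (ps.countP (fun p => decide (c ∈ (PySem.Set.ofList p.toList : List Char))) : Int) := by
  induction ps generalizing d with
  | nil => simp
  | cons p ps ih =>
      rw [List.foldl_cons, ih, PySem.Dict.getD_foldl_insert_add_one, List.countP_cons]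
      by_cases h : c ∈ (PySem.Set.ofList p.toList : List Char)
      · rw [List.count_eq_one_of_mem (PySem.Set.nodup_ofList _) h]
        simp [h]; ring
      · rw [List.count_eq_zero_of_not_mem h]
        simp [h]

-- keys of the tally dict: membership and nodup
lemma counts_keys_mem (ps : List String) (d : PySem.Dict Char Int) (c : Char) :
    c ∈ ((ps.foldl (fun d p =>
        (PySem.Set.ofList p.toList).foldl (fun d c => d.insert c (d.getD c 0 + 1)) d) d)).keys
      ↔ c ∈ d.keys ∨ ∃ p ∈ ps, c ∈ (PySem.Set.ofList p.toList : List Char) := by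
  induction ps generalizing d with
  | nil => simp
  | cons p ps ih =>
      rw [List.foldl_cons, ih, PySem.Dict.keys_foldl_insert, PySem.Set.mem_update]
      simp
      tauto

lemma counts_keys_nodup (ps : List String) (d : PySem.Dict Char Int) (hd : d.keys.Nodup) :
    ((ps.foldl (fun d p =>
        (PySem.Set.ofList p.toList).foldl (fun d c => d.insert c (d.getD c 0 + 1)) d) d)).keys.Nodup := by
  induction ps generalizing d with
  | nil => exact hd
  | cons p ps ih =>
      exact ih _ (PySem.Dict.nodup_keys_foldl_insert _ _ _ hd)

-- per-group equality of the two computations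
lemma group_eq (group : List String) (hne : group ≠ []) :
    ((pvInterAll ((PySem.Set.ofList group).map (fun s => PySem.Set.ofList s.toList))).length : Int)
    = (((((PySem.Set.ofList group).foldl (fun d p =>
          (PySem.Set.ofList p.toList).foldl (fun d c => d.insert c (d.getD c 0 + 1)) d)
          (PySem.Dict.empty : PySem.Dict Char Int))).values.countP
          (fun v => v == ((PySem.Set.ofList group).length : Int)) : Nat) : Int) := by
  set row : List String := PySem.Set.ofList group with hrow
  have hrowne : row ≠ [] := by
    intro h
    obtain ⟨g, hg⟩ := List.exists_mem_of_ne_nil group hne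
    have : g ∈ row := (PySem.Set.mem_ofList group g).mpr hg
    simp [h] at this
  set counts := row.foldl (fun d p =>
      (PySem.Set.ofList p.toList).foldl (fun d c => d.insert c (d.getD c 0 + 1)) d)
      (PySem.Dict.empty : PySem.Dict Char Int) with hcounts
  have hkn : counts.keys.Nodup := counts_keys_nodup row _ (by simp [PySem.Dict.empty, PySem.Dict.keys])
  -- B's count as a filtered-keys length
  have hvals : counts.values = counts.keys.map (fun k => counts.getD k 0) :=
    PySem.Dict.values_eq_map_keys counts hkn 0
  have hB : counts.values.countP (fun v => v == (row.length : Int))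
      = (counts.keys.filter (fun c => counts.getD c 0 == (row.length : Int))).length := by
    rw [hvals, List.countP_map, List.countP_eq_length_filter]; rfl
  -- both sides are lengths of nodup lists with the same membership
  obtain ⟨p0, rest, hcons⟩ := List.exists_cons_of_ne_nil hrowne
  have memA : ∀ c, c ∈ pvInterAll (row.map (fun s => PySem.Set.ofList s.toList))
      ↔ ∀ p ∈ row, c ∈ (PySem.Set.ofList p.toList : List Char) := by
    intro c
    rw [hcons]
    simp only [List.map_cons, pvInterAll, mem_foldl_inter]
    constructor
    · rintro ⟨h0, hrest⟩ p hp
      rcases List.mem_cons.mp hp with h | h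
      · exact h ▸ h0
      · exact hrest _ (List.mem_map_of_mem h)
    · intro h
      refine ⟨h p0 (List.mem_cons_self), ?_⟩
      rintro t ht
      obtain ⟨p, hp, rfl⟩ := List.mem_map.mp ht
      exact h p (List.mem_cons_of_mem _ hp)
  have memB : ∀ c, c ∈ counts.keys.filter (fun c => counts.getD c 0 == (row.length : Int))
      ↔ ∀ p ∈ row, c ∈ (PySem.Set.ofList p.toList : List Char) := by
    intro c
    rw [List.mem_filter]
    have hget := counts_getD row PySem.Dict.empty c
    have hget' : counts.getD c 0
        = (row.countP (fun p => decide (c ∈ (PySem.Set.ofList p.toList : List Char))) : Int) := by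
      rw [hcounts, hget]; simp [PySem.Dict.empty, PySem.Dict.getD, PySem.Dict.get?]
    have hkmem := counts_keys_mem row PySem.Dict.empty c
    have hkmem' : c ∈ counts.keys ↔ ∃ p ∈ row, c ∈ (PySem.Set.ofList p.toList : List Char) := by
      rw [hcounts, hkmem]; simp [PySem.Dict.empty, PySem.Dict.keys]
    rw [hkmem', hget']
    constructor
    · rintro ⟨-, hc⟩
      have : row.countP (fun p => decide (c ∈ (PySem.Set.ofList p.toList : List Char))) = row.length := by
        exact_mod_cast (beq_iff_eq.mp hc)
      intro p hp
      simpa using List.countP_eq_length.mp this p hp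
    · intro h
      have hcount : row.countP (fun p => decide (c ∈ (PySem.Set.ofList p.toList : List Char))) = row.length :=
        List.countP_eq_length.mpr (fun p hp => by simp only [decide_eq_true_eq]; exact h p hp)
      refine ⟨⟨p0, by rw [hcons]; exact ⟨List.mem_cons_self, h p0 (by rw [hcons]; exact List.mem_cons_self)⟩⟩, ?_⟩
      rw [hcount]
      simp
  have hnodA : (pvInterAll (row.map (fun s => PySem.Set.ofList s.toList))).Nodup := by
    rw [hcons]
    simp only [List.map_cons, pvInterAll]
    exact nodup_foldl_inter _ _ (PySem.Set.nodup_ofList _)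
  have hnodB : (counts.keys.filter (fun c => counts.getD c 0 == (row.length : Int))).Nodup :=
    List.Nodup.filter _ hkn
  have hlen : (pvInterAll (row.map (fun s => PySem.Set.ofList s.toList))).length
      = (counts.keys.filter (fun c => counts.getD c 0 == (row.length : Int))).length := by
    refine List.Perm.length_eq (List.perm_of_nodup_nodup_toFinset_eq hnodA hnodB ?_)
    ext c
    simp only [List.mem_toFinset]
    rw [memA c, memB c]
  rw [hB, hlen]

-- ===== VERDICT (by name: the statement is the Claim_ definition above) =====
theorem yesIntersect_spec : Claim_equal_yesIntersect := by
  intro data _ hpre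
  unfold Spec_yesIntersect yesIntersect yesIntersect_alt
  rw [PySem.List.foldl_append_singleton_eq_map, List.nil_append, List.foldl_map]
  refine PySem.List.foldl_congr_mem data _ _ 0 ?_
  intro acc group hg
  rw [PySem.List.foldl_append_singleton_eq_map, List.nil_append]
  simp only []
  rw [group_eq group (hpre group hg)]
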